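-- pv_equiv track=rewrite | github.com/ryanku98/SETpp | app/__init__.py | log_header
-- ===== SOURCE A (Python) =====
-- def log_header(title):
--     """Simple function to return a string of a title surrounded by dashes to represent a distinct section of log outputs"""
--     if len(title) == 0:
--         return '----------------------------------------'
--     while len(title) < 40:
--         if len(title) % 2 == 0:
--             title = '-' + title
--         else:
--             title = title + '-'
--     return title
-- ===== SOURCE B (Python) =====
-- def log_header(title):
--     """Pad title with dashes to length 40, computing the pad split in closed form."""
--     n = len(title)
--     pad = max(40 - n, 0)
--     left = (pad + (1 if n % 2 == 0 else 0)) // 2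
--     return '-' * left + title + '-' * (pad - left)
-- ===== Notes on version B (the rewrite author's own statement) =====
-- stated objective: simpler
-- what changed: Replaced the character-by-character growth loop (prepend on even length, append on odd) with a closed-form computation of the left/right dash counts, which also subsumes the empty-string special case.
import Mathlib
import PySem

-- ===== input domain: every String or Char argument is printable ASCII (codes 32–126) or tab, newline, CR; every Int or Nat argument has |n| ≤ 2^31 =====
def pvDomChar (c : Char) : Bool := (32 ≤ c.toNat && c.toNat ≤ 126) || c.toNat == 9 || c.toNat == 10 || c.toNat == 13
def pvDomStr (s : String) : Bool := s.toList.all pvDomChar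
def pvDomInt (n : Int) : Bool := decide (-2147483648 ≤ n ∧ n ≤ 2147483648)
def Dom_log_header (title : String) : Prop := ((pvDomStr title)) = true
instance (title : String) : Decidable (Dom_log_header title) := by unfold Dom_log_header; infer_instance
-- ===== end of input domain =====

-- B pads the title with dashes to length 40 via a closed-form split instead of A's growth loop; objective: simpler.

-- ===== PORT A =====
-- the while loop: while length < 40, prepend '-' on even length, append '-' on odd length
def logHeaderLoop (t : List Char) : List Char :=
  if t.length < 40 then
    logHeaderLoop (if t.length % 2 = 0 then '-' :: t else t ++ ['-'])
  else t
termination_by 40 - t.length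
decreasing_by
  split <;> simp only [List.length_cons, List.length_append, List.length_nil] <;> omega

def log_header (title : String) : String :=
  if title.toList.length = 0 then "----------------------------------------"
  else String.ofList (logHeaderLoop title.toList)

-- ===== PORT B =====
def log_header_alt (title : String) : String :=
  let n : Int := title.toList.length
  let pad : Int := max (40 - n) 0
  let left : Int := PySem.Int.floordiv (pad + (if PySem.Int.mod n 2 = 0 then 1 else 0)) 2
  String.ofList (List.replicate left.toNat '-' ++ title.toList ++ List.replicate (pad - left).toNat '-')

-- ===== PRECONDITION & SPEC =====
def Spec_log_header (title : String) (out : String) : Prop := out = log_header_alt title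
instance (title : String) (out : String) : Decidable (Spec_log_header title out) := by unfold Spec_log_header; infer_instance

-- ===== CLAIM (what is proved, stated in full; the proofs are below) =====
def Claim_equal_log_header : Prop := ∀ (title : String), Dom_log_header title → Spec_log_header title (log_header title)

-- ===== LEMMAS AND PROOFS =====

-- left/right dash counts as Nat functions of the current length
def leftDashes (n : Nat) : Nat := (40 - n + (if n % 2 = 0 then 1 else 0)) / 2
def rightDashes (n : Nat) : Nat := (40 - n) - leftDashes n

theorem logHeaderLoop_closed_aux : ∀ (k : Nat) (t : List Char), 40 ≤ t.length + k →
    logHeaderLoop t = List.replicate (leftDashes t.length) '-' ++ t ++ List.replicate (rightDashes t.length) '-' := by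
  intro k
  induction k with
  | zero =>
    intro t ht
    rw [logHeaderLoop, if_neg (by omega)]
    have h1 : leftDashes t.length = 0 := by simp only [leftDashes]; split <;> omega
    have h2 : rightDashes t.length = 0 := by simp only [rightDashes]; omega
    simp [h1, h2]
  | succ k ih =>
    intro t ht
    by_cases h : t.length < 40
    · rw [logHeaderLoop, if_pos h]
      by_cases hp : t.length % 2 = 0
      · rw [if_pos hp, ih ('-' :: t) (by simp only [List.length_cons]; omega)]
        have h1 : leftDashes ('-' :: t).length + 1 = leftDashes t.length := by
          simp only [leftDashes, List.length_cons]
          rw [if_pos hp, if_neg (by omega)]; omega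
        have h2 : rightDashes ('-' :: t).length = rightDashes t.length := by
          simp only [rightDashes, List.length_cons, leftDashes]
          rw [if_pos hp, if_neg (by omega)]; omega
        rw [h2, ← h1, List.replicate_add]
        simp
      · rw [if_neg hp, ih (t ++ ['-']) (by simp only [List.length_append, List.length_cons, List.length_nil]; omega)]
        have hlen : (t ++ ['-']).length = t.length + 1 := by simp
        have h1 : leftDashes (t.length + 1) = leftDashes t.length := by
          simp only [leftDashes]
          rw [if_neg hp, if_pos (by omega)]; omega
        have h2 : rightDashes (t.length + 1) + 1 = rightDashes t.length := by
          simp only [rightDashes, leftDashes]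
          rw [if_neg hp, if_pos (by omega)]; omega
        rw [hlen, h1, ← h2, List.replicate_succ']
        simp only [List.append_assoc, List.cons_append, List.nil_append]
        rw [← List.replicate_succ, List.replicate_succ']
    · rw [logHeaderLoop, if_neg h]
      have h1 : leftDashes t.length = 0 := by simp only [leftDashes]; split <;> omega
      have h2 : rightDashes t.length = 0 := by simp only [rightDashes]; omega
      simp [h1, h2]

theorem alt_closed (title : String) :
    log_header_alt title =
      String.ofList (List.replicate (leftDashes title.toList.length) '-' ++ title.toList ++
        List.replicate (rightDashes title.toList.length) '-') := by
  unfold log_header_alt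
  simp only []
  set n := title.toList.length with hn
  have hmod : PySem.Int.mod (n : Int) 2 = ((n % 2 : Nat) : Int) := PySem.Int.mod_natCast n 2
  have hpad : max (40 - (n : Int)) 0 = ((40 - n : Nat) : Int) := by omega
  have hL : (PySem.Int.floordiv (max (40 - (n : Int)) 0 + (if PySem.Int.mod (n : Int) 2 = 0 then 1 else 0)) 2).toNat
      = leftDashes n := by
    rw [hmod, hpad]
    by_cases hp : n % 2 = 0
    · rw [if_pos (by exact_mod_cast hp), PySem.Int.floordiv_eq_ediv_of_pos (by norm_num)]
      simp only [leftDashes, if_pos hp]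
      omega
    · rw [if_neg (by exact_mod_cast hp), PySem.Int.floordiv_eq_ediv_of_pos (by norm_num)]
      simp only [leftDashes, if_neg hp]
      omega
  have hR : (max (40 - (n : Int)) 0
        - PySem.Int.floordiv (max (40 - (n : Int)) 0 + (if PySem.Int.mod (n : Int) 2 = 0 then 1 else 0)) 2).toNat
      = rightDashes n := by
    have h0 : 0 ≤ PySem.Int.floordiv (max (40 - (n : Int)) 0 + (if PySem.Int.mod (n : Int) 2 = 0 then 1 else 0)) 2 := by
      rw [PySem.Int.floordiv_eq_ediv_of_pos (by omega)]
      positivity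
    simp only [rightDashes, ← hL]
    omega
  rw [hL, hR]

-- ===== VERDICT (by name: the statement is the Claim_ definition above) =====
theorem log_header_spec : Claim_equal_log_header := by
  intro title _
  unfold Spec_log_header log_header
  rw [alt_closed]
  by_cases h0 : title.toList.length = 0
  · rw [if_pos h0]
    rw [List.length_eq_zero_iff.mp h0]
    rfl
  · rw [if_neg h0, logHeaderLoop_closed_aux 40 title.toList (by omega)]
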